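-- pv_equiv track=rewrite | github.com/jentimanatol/quiz_app | quiz_app.py | extract_correct_letter
-- ===== SOURCE A (Python) =====
-- LETTER_CHOICES = ["A", "B", "C", "D"]
--
-- def extract_correct_letter(answer_field: str) -> str:
--     """
--     Normalize the correct answer letter from formats like:
--     "B", "B.", "B) Something", "B - Something", "b", etc.
--     """
--     if not isinstance(answer_field, str):
--         return ""
--     s = answer_field.strip()
--     for ch in s:
--         if ch.upper() in LETTER_CHOICES:
--             return ch.upper()
--     return ""
-- ===== SOURCE B (Python) =====
-- import re
--
-- def extract_correct_letter(answer_field: str) -> str: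
--     if not isinstance(answer_field, str):
--         return ""
--     m = re.search(r'[A-Da-d]', answer_field)
--     return m.group().upper() if m else ""
-- ===== Notes on version B (the rewrite author's own statement) =====
-- stated objective: idiomatic
-- what changed: Replaces strip + explicit per-character loop with per-char upper-then-membership test by a single regex search for the first A-D letter (either case) followed by uppercasing the match; stripping is dropped since whitespace can never match.
import Mathlib
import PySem

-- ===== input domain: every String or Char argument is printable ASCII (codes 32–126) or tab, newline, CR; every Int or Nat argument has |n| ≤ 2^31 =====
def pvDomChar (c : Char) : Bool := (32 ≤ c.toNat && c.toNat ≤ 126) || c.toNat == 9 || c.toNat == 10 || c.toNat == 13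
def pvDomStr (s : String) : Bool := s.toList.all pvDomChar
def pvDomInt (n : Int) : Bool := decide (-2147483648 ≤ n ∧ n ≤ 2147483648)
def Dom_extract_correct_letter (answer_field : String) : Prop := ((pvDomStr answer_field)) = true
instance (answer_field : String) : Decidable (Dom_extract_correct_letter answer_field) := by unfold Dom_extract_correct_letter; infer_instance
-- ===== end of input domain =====

-- B replaces A's strip + explicit per-character loop (uppercase each char, test membership
-- in LETTER_CHOICES) by a single regex-style first-match search for an A-D letter of either
-- case, uppercasing only the match; objective: idiomatic, same O(n) cost.


-- ===== PORT A =====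
def LETTER_CHOICES : List String := ["A", "B", "C", "D"]

-- the 'for ch in s: if ch.upper() in LETTER_CHOICES: return ch.upper()' loop of A
def extractLoopA : List Char → String
  | [] => ""
  | ch :: rest =>
      if PySem.Str.upper (String.ofList [ch]) ∈ LETTER_CHOICES then
        PySem.Str.upper (String.ofList [ch])
      else extractLoopA rest

def extract_correct_letter (answer_field : String) : String :=
  -- isinstance(answer_field, str) is always true for a String argument
  extractLoopA (PySem.Str.strip answer_field).toList

-- ===== PORT B =====
-- re.search(r'[A-Da-d]', s): first char in the class, ported as find? with the class predicate
def extract_correct_letter_alt (answer_field : String) : String :=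
  match answer_field.toList.find?
      (fun c => ('A' ≤ c && c ≤ 'D') || ('a' ≤ c && c ≤ 'd')) with
  | some c => PySem.Str.upper (String.ofList [c])
  | none => ""

-- ===== PRECONDITION & SPEC =====
def Spec_extract_correct_letter (answer_field : String) (out : String) : Prop := out = extract_correct_letter_alt answer_field
instance (answer_field : String) (out : String) : Decidable (Spec_extract_correct_letter answer_field out) := by unfold Spec_extract_correct_letter; infer_instance

-- ===== CLAIM (what is proved, stated in full; the proofs are below) =====
def Claim_equal_extract_correct_letter : Prop := ∀ (answer_field : String), Dom_extract_correct_letter answer_field → Spec_extract_correct_letter answer_field (extract_correct_letter answer_field)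

-- ===== LEMMAS AND PROOFS =====

-- the regex character class as a predicate
def pvClass (c : Char) : Bool := ('A' ≤ c && c ≤ 'D') || ('a' ≤ c && c ≤ 'd')

theorem char_toNat_inj {a b : Char} (h : a.toNat = b.toNat) : a = b := by
  apply Char.ext; exact UInt32.toNat_inj.1 h

-- A's membership test 'ch.upper() in LETTER_CHOICES' equals B's character class
theorem upper_mem_iff_class (c : Char) :
    (PySem.Str.upper (String.ofList [c]) ∈ LETTER_CHOICES) ↔ pvClass c = true := by
  have hup : PySem.Str.upper (String.ofList [c]) = String.ofList [PySem.Chars.upperChar c] := by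
    simp [PySem.Str.upper, PySem.Chars.upper]
  have hone : ∀ x y : Char, String.ofList [x] = String.ofList [y] ↔ x = y := by
    intro x y
    constructor
    · intro h; have := congrArg String.toList h; simpa using this
    · rintro rfl; rfl
  have hle : ∀ a b : Char, (a ≤ b) ↔ a.toNat ≤ b.toNat := fun a b => by
    rw [Char.le_def]; exact UInt32.le_iff_toNat_le ..
  have heq : ∀ a b : Char, a = b ↔ a.toNat = b.toNat :=
    fun a b => ⟨fun h => h ▸ rfl, char_toNat_inj⟩
  rw [hup]
  simp only [LETTER_CHOICES, List.mem_cons, List.not_mem_nil, or_false,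
    show ("A" : String) = String.ofList ['A'] from rfl,
    show ("B" : String) = String.ofList ['B'] from rfl,
    show ("C" : String) = String.ofList ['C'] from rfl,
    show ("D" : String) = String.ofList ['D'] from rfl,
    hone, pvClass, Bool.or_eq_true, Bool.and_eq_true, decide_eq_true_eq, hle, heq]
  simp only [PySem.Chars.upperChar, PySem.Chars.islower]
  have eA : ('A' : Char).toNat = 65 := rfl
  have eB : ('B' : Char).toNat = 66 := rfl
  have eC : ('C' : Char).toNat = 67 := rfl
  have eD : ('D' : Char).toNat = 68 := rfl
  have ea : ('a' : Char).toNat = 97 := rfl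
  have ed : ('d' : Char).toNat = 100 := rfl
  have ez : ('z' : Char).toNat = 122 := rfl
  by_cases hlow : ('a' ≤ c ∧ c ≤ 'z')
  · have h1 : 97 ≤ c.toNat := by rw [hle] at hlow; exact ea ▸ hlow.1
    have h2 : c.toNat ≤ 122 := by rw [hle] at hlow; exact ez ▸ hlow.2
    have ht : (Char.ofNat (c.toNat - 32)).toNat = c.toNat - 32 := by
      rw [Char.ofNat, dif_pos]
      · rfl
      · left; omega
    rw [if_pos (by simp [hlow.1, hlow.2])]
    simp only [ht, eA, eB, eC, eD, ea, ed]
    omega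
  · have hcond : (decide ('a' ≤ c) && decide (c ≤ 'z')) = false := by
      rcases not_and_or.1 hlow with h | h <;> simp [h]
    rw [if_neg (by simp [hcond])]
    simp only [eA, eB, eC, eD, ea, ed]
    rw [hle, hle, ea, ez] at hlow
    omega

-- a whitespace character is never in the class
theorem isspace_not_class {c : Char} (h : PySem.Chars.isspace c = true) : pvClass c = false := by
  have hle : ∀ a b : Char, (a ≤ b) ↔ a.toNat ≤ b.toNat := fun a b => by
    rw [Char.le_def]; exact UInt32.le_iff_toNat_le ..
  simp only [PySem.Chars.isspace, Bool.or_eq_true, Bool.and_eq_true, decide_eq_true_eq] at h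
  simp only [pvClass, Bool.or_eq_false_iff, Bool.and_eq_false_iff, decide_eq_false_iff_not, hle]
  have ea : ('a' : Char).toNat = 97 := rfl
  have eA : ('A' : Char).toNat = 65 := rfl
  have ed : ('d' : Char).toNat = 100 := rfl
  have eD : ('D' : Char).toNat = 68 := rfl
  rw [eA, eD, ea, ed]
  omega

-- A's loop is the first match in the class, uppercased
theorem extractLoopA_eq_find (cs : List Char) :
    extractLoopA cs = (match cs.find? pvClass with
      | some c => PySem.Str.upper (String.ofList [c])
      | none => "") := by
  induction cs with
  | nil => rfl
  | cons ch rest ih =>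
      by_cases h : pvClass ch = true
      · rw [extractLoopA, if_pos ((upper_mem_iff_class ch).2 h), List.find?_cons_of_pos h]
      · rw [extractLoopA, if_neg (fun hm => h ((upper_mem_iff_class ch).1 hm)),
          List.find?_cons_of_neg (by simp [h]), ih]

theorem find?_dropWhile_isspace (cs : List Char) :
    (cs.dropWhile (fun c => PySem.Chars.isspace c)).find? pvClass = cs.find? pvClass := by
  induction cs with
  | nil => rfl
  | cons ch rest ih =>
      by_cases h : PySem.Chars.isspace ch = true
      · rw [List.dropWhile_cons_of_pos (by simpa using h), ih,
          List.find?_cons_of_neg (by simp [isspace_not_class h])]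
      · rw [List.dropWhile_cons_of_neg (by simpa using h)]

-- stripping does not change the first class match
theorem find?_strip (cs : List Char) :
    (PySem.Chars.strip cs).find? pvClass = cs.find? pvClass := by
  have hstrip : PySem.Chars.strip cs =
      ((cs.dropWhile (fun c => PySem.Chars.isspace c)).reverse.dropWhile
        (fun c => PySem.Chars.isspace c)).reverse := by
    simp [PySem.Chars.strip, PySem.Chars.lstrip, PySem.Chars.rstrip]
  set l := cs.dropWhile (fun c => PySem.Chars.isspace c) with hl
  have hsplit : l.reverse = l.reverse.takeWhile (fun c => PySem.Chars.isspace c) ++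
      l.reverse.dropWhile (fun c => PySem.Chars.isspace c) :=
    (List.takeWhile_append_dropWhile).symm
  have hsuffix : l = (l.reverse.dropWhile (fun c => PySem.Chars.isspace c)).reverse ++
      (l.reverse.takeWhile (fun c => PySem.Chars.isspace c)).reverse := by
    conv_lhs => rw [← List.reverse_reverse l, hsplit]
    rw [List.reverse_append]
  have hnone : (l.reverse.takeWhile (fun c => PySem.Chars.isspace c)).reverse.find? pvClass
      = none := by
    rw [List.find?_eq_none]
    intro x hx
    have hx' : x ∈ l.reverse.takeWhile (fun c => PySem.Chars.isspace c) := by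
      simpa using hx
    have := List.mem_takeWhile_imp hx'
    simp [isspace_not_class (by simpa using this)]
  rw [hstrip, ← find?_dropWhile_isspace cs, ← hl]
  conv_rhs => rw [hsuffix]
  rw [List.find?_append, hnone, Option.or_none]

-- ===== VERDICT (by name: the statement is the Claim_ definition above) =====
theorem extract_correct_letter_spec : Claim_equal_extract_correct_letter := by
  intro answer_field _
  show extract_correct_letter answer_field = extract_correct_letter_alt answer_field
  rw [extract_correct_letter, extract_correct_letter_alt, extractLoopA_eq_find]
  have : (PySem.Str.strip answer_field).toList = PySem.Chars.strip answer_field.toList := by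
    simp [PySem.Str.toList_strip]
  rw [this, find?_strip]
  rfl
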